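-- pv_equiv track=rewrite | github.com/alexandraback/datacollection | solutions_5644738749267968_0/Python/Aussiroth/D.py | dowar
-- ===== SOURCE A (Python) =====
-- def dowar(naomi, ken):
--     warscore = 0
--     for i in range(0, len(naomi)):
--         size = naomi[i]
--         found=False
--         for j in range(0, len(ken)):
--             if ken[j]>size:
--                 found=True
--                 del ken[j]
--                 break
--         if found==False:
--             warscore+=(len(naomi)-i)
--             return warscore
--     return warscore
-- ===== SOURCE B (Python) =====
-- def dowar(naomi, ken):
--     # Segment tree (recursive) over ken positions storing subtree max;
--     # each query deletes the leftmost position with value > size.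
--     # Note: unlike A, this does not mutate the caller's ken list.
--     NEG = -(1 << 62)
--
--     def build(vals):
--         if len(vals) == 1:
--             return ('leaf', vals[0])
--         mid = len(vals) // 2
--         l = build(vals[:mid])
--         r = build(vals[mid:])
--         return ('node', max(l[1], r[1]), l, r)
--
--     def delete_leftmost_gt(t, s):
--         # precondition: t[1] > s
--         if t[0] == 'leaf':
--             return ('leaf', NEG)
--         _, _, l, r = t
--         if l[1] > s:
--             l2 = delete_leftmost_gt(l, s)
--             return ('node', max(l2[1], r[1]), l2, r)
--         r2 = delete_leftmost_gt(r, s)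
--         return ('node', max(l[1], r2[1]), l, r2)
--
--     n = len(naomi)
--     if not ken:
--         return n
--     t = build(ken)
--     for i, s in enumerate(naomi):
--         if t[1] <= s:
--             return n - i
--         t = delete_leftmost_gt(t, s)
--     return 0
-- ===== Notes on version B (the rewrite author's own statement) =====
-- stated objective: faster
-- what changed: Replaces A's per-query linear rescan of ken (with in-place deletion) by a recursive max segment tree over ken's positions: each naomi query checks the root max and deletes the leftmost position with value > size in O(log n); B does not mutate the caller's ken list.
import Mathlib
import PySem

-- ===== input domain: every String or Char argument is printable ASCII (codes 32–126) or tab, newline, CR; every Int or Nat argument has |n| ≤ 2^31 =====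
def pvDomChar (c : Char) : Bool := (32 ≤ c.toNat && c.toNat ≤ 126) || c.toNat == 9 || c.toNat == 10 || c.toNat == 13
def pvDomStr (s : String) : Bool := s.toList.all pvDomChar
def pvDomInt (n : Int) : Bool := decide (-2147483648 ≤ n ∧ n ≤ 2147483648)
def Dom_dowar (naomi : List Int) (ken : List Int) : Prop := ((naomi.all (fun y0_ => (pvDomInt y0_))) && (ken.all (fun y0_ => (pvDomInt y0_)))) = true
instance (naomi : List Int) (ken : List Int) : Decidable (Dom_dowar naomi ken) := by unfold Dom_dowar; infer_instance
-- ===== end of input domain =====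

-- B replaces A's O(n^2) rescans of ken by a recursive max segment tree over ken's
-- positions (delete leftmost position with value > size per query), O(n log n).
-- A deletes matched elements from the caller's ken list in place; B does not mutate
-- its arguments — the equivalence proved here is about the return value only.

-- ===== PORT A =====
-- inner loop of A: find first j with ken[j] > size, delete it (none = not found)
def removeFirstGt (size : Int) : List Int → Option (List Int)
  | [] => none
  | k :: rest => if k > size then some rest else (removeFirstGt size rest).map (k :: ·)

def dowarLoop (n i warscore : Int) (naomi ken : List Int) : Int :=
  match naomi with
  | [] => warscore
  | size :: rest =>
    match removeFirstGt size ken with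
    | some ken' => dowarLoop n (i + 1) warscore rest ken'
    | none => warscore + (n - i)

def dowar (naomi : List Int) (ken : List Int) : Int :=
  dowarLoop (naomi.length : Int) 0 0 naomi ken

-- ===== PORT B =====
def pvNEG : Int := -(2 ^ 62)

inductive PvTree where
  | leaf (v : Int)
  | node (mx : Int) (l r : PvTree)
deriving Repr, DecidableEq

def pvVal : PvTree → Int
  | .leaf v => v
  | .node mx _ _ => mx

-- build(vals) of Source B; the [] case is unreachable (build is only called on nonempty lists)
def buildT : List Int → PvTree
  | [] => .leaf pvNEG
  | [v] => .leaf v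
  | v₀ :: v₁ :: vs =>
    .node (max (pvVal (buildT ((v₀ :: v₁ :: vs).take ((v₀ :: v₁ :: vs).length / 2))))
               (pvVal (buildT ((v₀ :: v₁ :: vs).drop ((v₀ :: v₁ :: vs).length / 2)))))
          (buildT ((v₀ :: v₁ :: vs).take ((v₀ :: v₁ :: vs).length / 2)))
          (buildT ((v₀ :: v₁ :: vs).drop ((v₀ :: v₁ :: vs).length / 2)))
termination_by vals => vals.length
decreasing_by
  all_goals simp [List.length_take, List.length_drop]; omega

-- delete_leftmost_gt(t, s) of Source B (precondition: pvVal t > s)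
def delLeftGt (s : Int) : PvTree → PvTree
  | .leaf _ => .leaf pvNEG
  | .node _ l r =>
    if pvVal l > s then
      let l2 := delLeftGt s l
      .node (max (pvVal l2) (pvVal r)) l2 r
    else
      let r2 := delLeftGt s r
      .node (max (pvVal l) (pvVal r2)) l r2

def dowarAltLoop (n i : Int) (t : PvTree) (naomi : List Int) : Int :=
  match naomi with
  | [] => 0
  | s :: rest => if pvVal t ≤ s then n - i else dowarAltLoop n (i + 1) (delLeftGt s t) rest

def dowar_alt (naomi : List Int) (ken : List Int) : Int :=
  let n : Int := naomi.length
  match ken with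
  | [] => n
  | _ :: _ => dowarAltLoop n 0 (buildT ken) naomi

-- ===== PRECONDITION & SPEC =====
def Spec_dowar (naomi : List Int) (ken : List Int) (out : Int) : Prop := out = dowar_alt naomi ken
instance (naomi : List Int) (ken : List Int) (out : Int) : Decidable (Spec_dowar naomi ken out) := by unfold Spec_dowar; infer_instance

-- ===== CLAIM (what is proved, stated in full; the proofs are below) =====
def Claim_equal_dowar : Prop := ∀ (naomi : List Int) (ken : List Int), Dom_dowar naomi ken → Spec_dowar naomi ken (dowar naomi ken)

-- ===== LEMMAS AND PROOFS =====

-- the leaves of a tree, left to right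
def pvToList : PvTree → List Int
  | .leaf v => [v]
  | .node _ l r => pvToList l ++ pvToList r

-- well-formed segment tree: every cached mx is the max of the children's values
def pvWF : PvTree → Prop
  | .leaf _ => True
  | .node mx l r => mx = max (pvVal l) (pvVal r) ∧ pvWF l ∧ pvWF r

-- all leaves at least the sentinel
def pvLB (t : PvTree) : Prop := ∀ x ∈ pvToList t, pvNEG ≤ x

def foldMax (xs : List Int) : Int := xs.foldr max pvNEG

-- the list operation delLeftGt performs on the leaves
def setFirstGt (s : Int) : List Int → List Int
  | [] => []
  | x :: rest => if x > s then pvNEG :: rest else x :: setFirstGt s rest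

-- leaves still present in A's ken list (deleted ones are the sentinel)
def alive (xs : List Int) : List Int := xs.filter (fun x => decide (pvNEG < x))

theorem foldr_max_ge (b : List Int) : pvNEG ≤ b.foldr max pvNEG := by
  induction b with
  | nil => simp
  | cons y ys ih =>
    refine le_trans ih ?_
    simp only [List.foldr]
    omega

theorem foldr_max_const (a : List Int) (c e : Int) (h : e ≤ c) :
    a.foldr max c = max (a.foldr max e) c := by
  induction a with
  | nil => simp; omega
  | cons x xs ih => simp [List.foldr, ih]

theorem foldMax_append (a b : List Int) :
    foldMax (a ++ b) = max (foldMax a) (foldMax b) := by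
  unfold foldMax
  rw [List.foldr_append]
  exact foldr_max_const a _ pvNEG (foldr_max_ge b)

theorem foldMax_gt {s : Int} (hs : pvNEG ≤ s) (xs : List Int) :
    s < foldMax xs ↔ ∃ x ∈ xs, s < x := by
  induction xs with
  | nil => simp [foldMax]; omega
  | cons x rest ih =>
    have hcons : foldMax (x :: rest) = max x (foldMax rest) := rfl
    rw [hcons]
    constructor
    · intro h
      by_cases hx : s < x
      · exact ⟨x, List.mem_cons_self, hx⟩
      · exact ((ih.mp (by omega)).imp (fun y hy => ⟨List.mem_cons_of_mem _ hy.1, hy.2⟩))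
    · rintro ⟨y, hy, hys⟩
      rcases List.mem_cons.mp hy with rfl | hy
      · omega
      · have := ih.mpr ⟨y, hy, hys⟩; omega

theorem pvVal_eq_foldMax {t : PvTree} (h : pvWF t) (hLB : pvLB t) :
    pvVal t = foldMax (pvToList t) := by
  induction t with
  | leaf v =>
    have : pvNEG ≤ v := hLB v (by simp [pvToList])
    show v = max v pvNEG
    omega
  | node mx l r ihl ihr =>
    obtain ⟨hmx, hl, hr⟩ := h
    have hLBl : pvLB l := fun x hx => hLB x (by simp [pvToList]; exact Or.inl hx)
    have hLBr : pvLB r := fun x hx => hLB x (by simp [pvToList]; exact Or.inr hx)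
    show mx = foldMax (pvToList l ++ pvToList r)
    rw [foldMax_append, hmx, ihl hl hLBl, ihr hr hLBr]

theorem setFirstGt_append_left {s : Int} {a : List Int} (b : List Int)
    (h : ∃ x ∈ a, s < x) : setFirstGt s (a ++ b) = setFirstGt s a ++ b := by
  induction a with
  | nil => simp at h
  | cons x rest ih =>
    by_cases hx : x > s
    · simp [setFirstGt, hx]
    · have hex : ∃ y ∈ rest, s < y := by
        rcases h with ⟨y, hy, hys⟩
        rcases List.mem_cons.mp hy with rfl | hy
        · omega
        · exact ⟨y, hy, hys⟩
      simp [setFirstGt, hx, ih hex]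

theorem setFirstGt_append_right {s : Int} {a : List Int} (b : List Int)
    (h : ∀ x ∈ a, ¬ s < x) : setFirstGt s (a ++ b) = a ++ setFirstGt s b := by
  induction a with
  | nil => simp
  | cons x rest ih =>
    have hx : ¬ x > s := h x List.mem_cons_self
    simp [setFirstGt, hx, ih (fun y hy => h y (List.mem_cons_of_mem _ hy))]

theorem delLeftGt_spec {s : Int} (hs : pvNEG ≤ s) :
    ∀ t : PvTree, pvWF t → pvLB t → s < pvVal t →
      pvWF (delLeftGt s t) ∧ pvToList (delLeftGt s t) = setFirstGt s (pvToList t) ∧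
        pvLB (delLeftGt s t) := by
  intro t
  induction t with
  | leaf v =>
    intro _ _ hgt
    have hgt' : s < v := hgt
    refine ⟨trivial, ?_, ?_⟩
    · show [pvNEG] = setFirstGt s [v]
      simp [setFirstGt]
      omega
    · intro x hx
      simp [delLeftGt, pvToList] at hx
      omega
  | node mx l r ihl ihr =>
    intro hWF hLB hgt
    obtain ⟨hmx, hwl, hwr⟩ := hWF
    have hLBl : pvLB l := fun x hx => hLB x (by simp [pvToList]; exact Or.inl hx)
    have hLBr : pvLB r := fun x hx => hLB x (by simp [pvToList]; exact Or.inr hx)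
    by_cases hl : pvVal l > s
    · obtain ⟨w1, w2, w3⟩ := ihl hwl hLBl hl
      have hd : delLeftGt s (.node mx l r)
          = .node (max (pvVal (delLeftGt s l)) (pvVal r)) (delLeftGt s l) r := by
        simp [delLeftGt, hl]
      have hsplit : setFirstGt s (pvToList l ++ pvToList r)
          = setFirstGt s (pvToList l) ++ pvToList r := by
        apply setFirstGt_append_left
        exact (foldMax_gt hs _).mp (pvVal_eq_foldMax hwl hLBl ▸ hl)
      rw [hd]
      refine ⟨⟨rfl, w1, hwr⟩, ?_, ?_⟩
      · show pvToList (delLeftGt s l) ++ pvToList r = _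
        rw [w2]
        exact hsplit.symm
      · intro x hx
        rcases List.mem_append.mp hx with hx | hx
        · exact w3 x hx
        · exact hLBr x hx
    · have hr : s < pvVal r := by
        have : mx = max (pvVal l) (pvVal r) := hmx
        have hgt' : s < mx := hgt
        omega
      obtain ⟨w1, w2, w3⟩ := ihr hwr hLBr hr
      have hd : delLeftGt s (.node mx l r)
          = .node (max (pvVal l) (pvVal (delLeftGt s r))) l (delLeftGt s r) := by
        simp [delLeftGt, hl]
      have hnone : ∀ x ∈ pvToList l, ¬ s < x := by
        intro x hx hsx
        exact hl ((pvVal_eq_foldMax hwl hLBl ▸ (foldMax_gt hs (pvToList l))).mpr ⟨x, hx, hsx⟩)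
      rw [hd]
      refine ⟨⟨rfl, hwl, w1⟩, ?_, ?_⟩
      · show pvToList l ++ pvToList (delLeftGt s r) = _
        rw [w2]
        exact (setFirstGt_append_right _ hnone).symm
      · intro x hx
        rcases List.mem_append.mp hx with hx | hx
        · exact hLBl x hx
        · exact w3 x hx

theorem removeFirstGt_none {s : Int} :
    ∀ xs : List Int, (∀ x ∈ xs, pvNEG ≤ x) → ¬ s < foldMax xs →
      removeFirstGt s (alive xs) = none := by
  intro xs
  induction xs with
  | nil => intro _ _; simp [alive, removeFirstGt]
  | cons x rest ih =>
    intro hLB hmax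
    have hcons : foldMax (x :: rest) = max x (foldMax rest) := rfl
    rw [hcons] at hmax
    have hx : ¬ s < x := by omega
    have hrest := ih (fun y hy => hLB y (List.mem_cons_of_mem _ hy)) (by omega)
    by_cases ha : pvNEG < x
    · simp only [alive, List.filter] at hrest ⊢
      simp [ha, removeFirstGt, hx, hrest]
    · simp only [alive, List.filter] at hrest ⊢
      simp [ha, hrest]

theorem removeFirstGt_some {s : Int} (hs : pvNEG ≤ s) :
    ∀ xs : List Int, (∀ x ∈ xs, pvNEG ≤ x) → s < foldMax xs →
      removeFirstGt s (alive xs) = some (alive (setFirstGt s xs)) := by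
  intro xs
  induction xs with
  | nil =>
    intro _ h
    exfalso
    have : foldMax ([] : List Int) = pvNEG := rfl
    omega
  | cons x rest ih =>
    intro hLB hmax
    have hcons : foldMax (x :: rest) = max x (foldMax rest) := rfl
    rw [hcons] at hmax
    by_cases hx : s < x
    · have ha : pvNEG < x := by omega
      simp [alive, List.filter, ha, removeFirstGt, hx, setFirstGt]
    · have hrest := ih (fun y hy => hLB y (List.mem_cons_of_mem _ hy)) (by omega)
      by_cases ha : pvNEG < x
      · simp only [alive, List.filter] at hrest ⊢
        simp [ha, removeFirstGt, hx, setFirstGt, hrest]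
      · have hxeq : x = pvNEG := le_antisymm (by omega) (hLB x List.mem_cons_self)
        simp only [alive, List.filter] at hrest ⊢
        simp [ha, setFirstGt, hx, hrest]

theorem loop_eq (naomi : List Int) :
    ∀ (n i w : Int) (t : PvTree) (ken : List Int),
      pvWF t → pvLB t → alive (pvToList t) = ken →
      (∀ x ∈ naomi, pvNEG ≤ x) →
      dowarLoop n i w naomi ken = w + dowarAltLoop n i t naomi := by
  induction naomi with
  | nil => intro n i w t ken _ _ _ _; simp [dowarLoop, dowarAltLoop]
  | cons s rest ih =>
    intro n i w t ken hWF hLB hAlive hDom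
    have hs : pvNEG ≤ s := hDom s List.mem_cons_self
    have hval := pvVal_eq_foldMax hWF hLB
    by_cases hgt : s < pvVal t
    · have hsome := removeFirstGt_some hs (pvToList t) hLB (hval ▸ hgt)
      obtain ⟨w1, w2, w3⟩ := delLeftGt_spec hs t hWF hLB hgt
      rw [hAlive] at hsome
      simp [dowarLoop, hsome, dowarAltLoop, not_le.mpr hgt]
      exact ih n (i + 1) w (delLeftGt s t) _ w1 w3 (by rw [w2]) (fun y hy => hDom y (List.mem_cons_of_mem _ hy))
    · have hnone := removeFirstGt_none (pvToList t) hLB (hval ▸ hgt)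
      rw [hAlive] at hnone
      simp [dowarLoop, hnone, dowarAltLoop, not_lt.mp hgt]

theorem buildT_spec : ∀ ks : List Int, ks ≠ [] →
    pvWF (buildT ks) ∧ pvToList (buildT ks) = ks := by
  intro ks
  induction ks using buildT.induct with
  | case1 => intro h; exact absurd rfl h
  | case2 v => intro _; exact ⟨by simp [buildT, pvWF], by simp [buildT, pvToList]⟩
  | case3 v₀ v₁ vs ihl ihr =>
    intro _
    have hlen : (v₀ :: v₁ :: vs).length ≥ 2 := by simp
    have hmid1 : 1 ≤ (v₀ :: v₁ :: vs).length / 2 := by omega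
    have hmid2 : (v₀ :: v₁ :: vs).length / 2 < (v₀ :: v₁ :: vs).length := by omega
    have htake : (v₀ :: v₁ :: vs).take ((v₀ :: v₁ :: vs).length / 2) ≠ [] := by
      intro h
      have := congrArg List.length h
      simp only [List.length_take, List.length_nil] at this
      omega
    have hdrop : (v₀ :: v₁ :: vs).drop ((v₀ :: v₁ :: vs).length / 2) ≠ [] := by
      intro h
      have := congrArg List.length h
      simp only [List.length_drop, List.length_nil] at this
      omega
    obtain ⟨wl1, wl2⟩ := ihl htake
    obtain ⟨wr1, wr2⟩ := ihr hdrop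
    have hb : buildT (v₀ :: v₁ :: vs)
        = .node (max (pvVal (buildT ((v₀ :: v₁ :: vs).take ((v₀ :: v₁ :: vs).length / 2))))
                     (pvVal (buildT ((v₀ :: v₁ :: vs).drop ((v₀ :: v₁ :: vs).length / 2)))))
                (buildT ((v₀ :: v₁ :: vs).take ((v₀ :: v₁ :: vs).length / 2)))
                (buildT ((v₀ :: v₁ :: vs).drop ((v₀ :: v₁ :: vs).length / 2))) := by
      rw [buildT]
    rw [hb]
    refine ⟨⟨rfl, wl1, wr1⟩, ?_⟩
    show pvToList _ ++ pvToList _ = _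
    rw [wl2, wr2, List.take_append_drop]

-- ===== VERDICT (by name: the statement is the Claim_ definition above) =====
theorem dowar_spec : Claim_equal_dowar := by
  intro naomi ken hDom
  unfold Spec_dowar dowar dowar_alt
  have hDom' : (∀ x ∈ naomi, pvNEG ≤ x) ∧ (∀ x ∈ ken, pvNEG < x) := by
    unfold Dom_dowar at hDom
    simp [List.all_eq_true, pvDomInt] at hDom
    constructor
    · intro x hx; have := hDom.1 x hx; unfold pvNEG; omega
    · intro x hx; have := hDom.2 x hx; unfold pvNEG; omega
  match ken with
  | [] =>
    match naomi with
    | [] => simp [dowarLoop]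
    | s :: rest => simp [dowarLoop, removeFirstGt]
  | k :: ks =>
    obtain ⟨hWF, hTL⟩ := buildT_spec (k :: ks) (by simp)
    have hLB : pvLB (buildT (k :: ks)) := by
      intro x hx; rw [hTL] at hx; exact le_of_lt (hDom'.2 x hx)
    have hAlive : alive (pvToList (buildT (k :: ks))) = k :: ks := by
      rw [hTL]
      unfold alive
      rw [List.filter_eq_self.mpr]
      intro x hx
      simpa using hDom'.2 x hx
    have := loop_eq naomi (naomi.length : Int) 0 0 (buildT (k :: ks)) (k :: ks) hWF hLB hAlive hDom'.1
    simpa using this
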